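-- pv_equiv track=rewrite | github.com/Shanyao-HEU/PTA-PAT | pat-b/1031.py | compute_m
-- ===== SOURCE A (Python) =====
-- def compute_m(num):
--     weights = [7,9,10,5,8,4,2,1,6,3,7,9,10,5,8,4,2]
--     z_m = {0:'1', 1:'0', 2:"X", 3:"9", 4:"8", 5:"7",
--            6:"6", 7:"5", 8:"4", 9:"3", 10:"2"}
--     temp = 0
--     for i, n in enumerate(num[:-1]):
--         temp += weights[i] * int(n)
--     z = temp % 11
--     m = z_m[z]
--     return m
-- ===== SOURCE B (Python) =====
-- def compute_m(num):
--     # Horner's rule: the PAT ID weights are 2**(17-i) mod 11, so the weighted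
--     # sum mod 11 equals a base-2 Horner evaluation of the digits mod 11,
--     # rescaled by the power of two matching the string's length.
--     z = 0
--     for d in num[:-1]:
--         z = (z * 2 + int(d)) % 11
--     z = z * pow(2, 19 - len(num), 11) % 11
--     c = (12 - z) % 11
--     return 'X' if c == 10 else str(c)
-- ===== Notes on version B (the rewrite author's own statement) =====
-- stated objective: alternative
-- what changed: B discards both the 17-entry weight table and the 11-entry remainder dict: since the PAT weights are 2^(17-i) mod 11, B evaluates the digit string by Horner's rule modulo 11 (z = (z*2 + d) % 11), rescales by pow(2, 19-len(num), 11), and maps the residue with the closed-form check digit (12 - z) % 11 ('X' for 10).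
import Mathlib
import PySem

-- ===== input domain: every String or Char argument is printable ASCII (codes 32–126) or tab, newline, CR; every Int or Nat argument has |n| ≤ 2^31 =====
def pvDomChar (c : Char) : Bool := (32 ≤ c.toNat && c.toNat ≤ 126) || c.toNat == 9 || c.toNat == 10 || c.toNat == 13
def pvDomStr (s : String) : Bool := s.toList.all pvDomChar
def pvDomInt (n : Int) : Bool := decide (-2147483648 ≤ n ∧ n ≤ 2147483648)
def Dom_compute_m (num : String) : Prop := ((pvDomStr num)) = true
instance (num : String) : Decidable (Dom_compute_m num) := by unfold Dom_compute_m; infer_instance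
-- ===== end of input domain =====

-- B drops the weight table and the 11-entry lookup dict entirely: the PAT weights are
-- 2^(17-i) mod 11, so B evaluates the digits by Horner's rule mod 11 (rescaled by the
-- power of two matching the length) and maps the residue by the closed form: alternative.

-- ===== PORT A =====
def pvW : List Int := [7, 9, 10, 5, 8, 4, 2, 1, 6, 3, 7, 9, 10, 5, 8, 4, 2]

def pvZM : PySem.Dict Int String :=
  PySem.Dict.ofList [(0, "1"), (1, "0"), (2, "X"), (3, "9"), (4, "8"), (5, "7"),
                     (6, "6"), (7, "5"), (8, "4"), (9, "3"), (10, "2")]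

-- int(n) for a one-character string; exact on digit characters (guaranteed by Pre_)
def pvDigit (c : Char) : Int := (PySem.Int.ofChars? [c]).getD 0

def compute_m (num : String) : String :=
  -- temp accumulated over enumerate(num[:-1]); weights[i] via pyGetD (in range under Pre_)
  let cs := PySem.List.slice num.toList none (some (-1))
  let temp := (PySem.List.enumerate cs 0).foldl
    (fun t p => t + PySem.List.pyGetD pvW p.1 0 * pvDigit p.2) 0
  let z := PySem.Int.mod temp 11
  -- z_m[z]: 0 ≤ z < 11 always, so the KeyError branch is unreachable
  PySem.Dict.getD pvZM z ""

-- ===== PORT B =====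
def compute_m_alt (num : String) : String :=
  let cs := PySem.List.slice num.toList none (some (-1))
  -- Horner loop: z = (z * 2 + int(d)) % 11 over num[:-1]
  let h := cs.foldl (fun z c => PySem.Int.mod (z * 2 + pvDigit c) 11) 0
  -- z = z * pow(2, 19 - len(num), 11) % 11  (pow ported as 2^e mod 11)
  let z := PySem.Int.mod (h * PySem.Int.mod ((2 : Int) ^ (19 - num.toList.length)) 11) 11
  let c := PySem.Int.mod (12 - z) 11
  if c = 10 then "X" else PySem.Int.toStr c

-- ===== PRECONDITION & SPEC =====
-- Pre_ excludes exactly the inputs where A raises: a string longer than 18 characters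
-- (weights[17] is an IndexError) or a non-digit among num[:-1] (int(n) is a ValueError).
def Pre_compute_m (num : String) : Prop :=
  num.toList.length ≤ 18 ∧ num.toList.dropLast.all (fun c => c.isDigit) = true
instance (num : String) : Decidable (Pre_compute_m num) := by unfold Pre_compute_m; infer_instance

def pvWitness_compute_m : String := "11010519491231002X"

def Spec_compute_m (num : String) (out : String) : Prop := out = compute_m_alt num
instance (num : String) (out : String) : Decidable (Spec_compute_m num out) := by unfold Spec_compute_m; infer_instance

-- ===== CLAIM (what is proved, stated in full; the proofs are below) =====
def Claim_equal_compute_m : Prop := ∀ (num : String), Dom_compute_m num → Pre_compute_m num → Spec_compute_m num (compute_m num)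

-- ===== LEMMAS AND PROOFS =====

-- the base-2 polynomial of the digit list (Horner's target value)
def pvP : List Char → Int
  | [] => 0
  | c :: cs => pvDigit c * 2 ^ cs.length + pvP cs

-- A's indexed loop over enumerate equals the zip-based weighted sum, for any start
-- index that keeps every access within the 17 weights.
lemma pv_fold_eq_zip (cs : List Char) : ∀ (i : Nat) (acc : Int), i + cs.length ≤ 17 →
    (PySem.List.enumerate cs (i : Int)).foldl
      (fun t p => t + PySem.List.pyGetD pvW p.1 0 * pvDigit p.2) acc
    = acc + (((pvW.drop i).zip cs).map (fun p => p.1 * pvDigit p.2)).sum := by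
  induction cs with
  | nil => intro i acc _; simp [PySem.List.enumerate_nil]
  | cons c cs ih =>
    intro i acc h
    simp only [List.length_cons] at h
    have hi : i < pvW.length := by
      have hw : pvW.length = 17 := rfl
      omega
    rw [PySem.List.enumerate_cons]
    simp only [List.foldl_cons]
    have : ((i : Int) + 1) = ((i + 1 : Nat) : Int) := by push_cast; ring
    rw [this, ih (i + 1) _ (by omega)]
    rw [List.drop_eq_getElem_cons hi]
    simp only [List.zip_cons_cons, List.map_cons, List.sum_cons]
    have hg : PySem.List.pyGetD pvW (i : Int) 0 = pvW[i] := by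
      rw [PySem.List.pyGetD_natCast, List.getD_eq_getElem pvW 0 hi]
    rw [hg]; ring

-- each weight is 2^(17-i) modulo 11
lemma pv_weight_pow (i : Nat) (hi : i < 17) : pvW.getD i 0 ≡ 2 ^ (17 - i) [ZMOD 11] := by
  interval_cases i <;> decide

-- the weighted zip-sum is the scaled polynomial, modulo 11
lemma pv_zip_modeq (cs : List Char) : ∀ (i : Nat), i + cs.length ≤ 17 →
    (((pvW.drop i).zip cs).map (fun p => p.1 * pvDigit p.2)).sum
      ≡ 2 ^ (18 - i - cs.length) * pvP cs [ZMOD 11] := by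
  induction cs with
  | nil => intro i _; simp [pvP]
  | cons c cs ih =>
    intro i h
    simp only [List.length_cons] at h
    have hi : i < pvW.length := by
      have hw : pvW.length = 17 := rfl
      omega
    rw [List.drop_eq_getElem_cons hi]
    simp only [List.zip_cons_cons, List.map_cons, List.sum_cons, List.length_cons, pvP]
    have h1 : pvW[i] ≡ 2 ^ (17 - i) [ZMOD 11] := by
      have := pv_weight_pow i (by omega)
      rwa [List.getD_eq_getElem pvW 0 hi] at this
    have h2 := ih (i + 1) (by omega)
    have hsum := (h1.mul_right (pvDigit c)).add h2
    have hexp1 : (17 : Nat) - i = (18 - (i + 1) - cs.length) + cs.length := by omega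
    have hexp2 : (18 : Nat) - i - (cs.length + 1) = 18 - (i + 1) - cs.length := by omega
    calc pvW[i] * pvDigit c + (((pvW.drop (i + 1)).zip cs).map (fun p => p.1 * pvDigit p.2)).sum
        ≡ 2 ^ (17 - i) * pvDigit c + 2 ^ (18 - (i + 1) - cs.length) * pvP cs [ZMOD 11] := hsum
      _ = 2 ^ (18 - i - (cs.length + 1)) * (pvDigit c * 2 ^ cs.length + pvP cs) := by
          rw [hexp1, hexp2, pow_add]; ring

-- Horner's loop computes the polynomial, modulo 11
lemma pv_horner_modeq (cs : List Char) : ∀ (z0 : Int),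
    cs.foldl (fun z c => PySem.Int.mod (z * 2 + pvDigit c) 11) z0
      ≡ z0 * 2 ^ cs.length + pvP cs [ZMOD 11] := by
  induction cs with
  | nil => intro z0; simp [pvP]
  | cons c cs ih =>
    intro z0
    simp only [List.foldl_cons, List.length_cons, pvP]
    have hstep : PySem.Int.mod (z0 * 2 + pvDigit c) 11 ≡ z0 * 2 + pvDigit c [ZMOD 11] := by
      rw [PySem.Int.mod_eq_emod_of_pos (by norm_num)]
      exact Int.emod_emod_of_dvd _ dvd_rfl
    calc (cs.foldl (fun z c => PySem.Int.mod (z * 2 + pvDigit c) 11)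
            (PySem.Int.mod (z0 * 2 + pvDigit c) 11))
        ≡ PySem.Int.mod (z0 * 2 + pvDigit c) 11 * 2 ^ cs.length + pvP cs [ZMOD 11] := ih _
      _ ≡ (z0 * 2 + pvDigit c) * 2 ^ cs.length + pvP cs [ZMOD 11] :=
          (hstep.mul_right _).add_right _
      _ = z0 * 2 ^ (cs.length + 1) + (pvDigit c * 2 ^ cs.length + pvP cs) := by ring

-- the table lookup equals the closed-form mapping on every remainder 0..10
lemma pv_table_eq_formula (z : Int) (h0 : 0 ≤ z) (h1 : z < 11) :
    PySem.Dict.getD pvZM z "" =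
      (if PySem.Int.mod (12 - z) 11 = 10 then "X" else PySem.Int.toStr (PySem.Int.mod (12 - z) 11)) := by
  interval_cases z <;> decide

-- ===== VERDICT (by name: the statement is the Claim_ definition above) =====
theorem compute_m_spec : Claim_equal_compute_m := by
  intro num _ hpre
  unfold Spec_compute_m compute_m compute_m_alt
  simp only [PySem.List.slice_to_neg_one]
  by_cases hnil : num.toList = []
  · simp only [hnil]; decide
  set cs := num.toList.dropLast with hcs
  have hlen : cs.length ≤ 17 := by
    have := hpre.1
    simp only [hcs, List.length_dropLast]; omega
  -- A's accumulated sum, rewritten to the zip sum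
  have hfold := pv_fold_eq_zip cs 0 0 (by simpa using hlen)
  norm_num at hfold
  rw [hfold]
  -- both remainders are equal
  have hA := pv_zip_modeq cs 0 (by simpa using hlen)
  simp only [Nat.sub_zero, List.drop_zero] at hA
  have hB := pv_horner_modeq cs 0
  simp only [zero_mul, zero_add] at hB
  have hexp : (19 : Nat) - num.toList.length = 18 - cs.length := by
    have h1 : cs.length = num.toList.length - 1 := by
      rw [hcs]; exact List.length_dropLast
    have h2 := hpre.1
    have h3 : 0 < num.toList.length := List.length_pos_iff.mpr hnil
    omega
  set H := cs.foldl (fun z c => PySem.Int.mod (z * 2 + pvDigit c) 11) 0 with hH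
  have hz : PySem.Int.mod (((pvW.zip cs).map (fun p => p.1 * pvDigit p.2)).sum) 11
      = PySem.Int.mod (H * PySem.Int.mod ((2 : Int) ^ (19 - num.toList.length)) 11) 11 := by
    rw [hexp]
    rw [PySem.Int.mod_eq_emod_of_pos (by norm_num),
        PySem.Int.mod_eq_emod_of_pos (by norm_num),
        PySem.Int.mod_eq_emod_of_pos (by norm_num)]
    have hB' : H * ((2 : Int) ^ (18 - cs.length) % 11)
        ≡ pvP cs * 2 ^ (18 - cs.length) [ZMOD 11] := by
      calc H * ((2 : Int) ^ (18 - cs.length) % 11)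
          ≡ pvP cs * ((2 : Int) ^ (18 - cs.length) % 11) [ZMOD 11] := hB.mul_right _
        _ ≡ pvP cs * (2 : Int) ^ (18 - cs.length) [ZMOD 11] :=
            Int.ModEq.mul_left _ (Int.emod_emod_of_dvd _ dvd_rfl)
    have : ((pvW.zip cs).map (fun p => p.1 * pvDigit p.2)).sum
        ≡ H * ((2 : Int) ^ (18 - cs.length) % 11) [ZMOD 11] := by
      calc ((pvW.zip cs).map (fun p => p.1 * pvDigit p.2)).sum
          ≡ 2 ^ (18 - cs.length) * pvP cs [ZMOD 11] := hA
        _ = pvP cs * 2 ^ (18 - cs.length) := by ring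
        _ ≡ H * ((2 : Int) ^ (18 - cs.length) % 11) [ZMOD 11] := hB'.symm
    exact this
  rw [hz]
  exact pv_table_eq_formula _ (PySem.Int.mod_nonneg _ (by norm_num)) (PySem.Int.mod_lt _ (by norm_num))
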